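-- pv_equiv track=rewrite | github.com/Nghia03092004/nghia03092004.github.io | project_euler_unified/problem_413/solution.py | solve_small_brute
-- ===== SOURCE A (Python) =====
-- def solve_small_brute(N):
--     """Brute-force count of one-child numbers less than N (for verification)."""
--     count = 0
--     for n in range(1, N):
--         s = str(n)
--         d = len(s)
--         divisible_count = 0
--         for i in range(d):
--             for j in range(i + 1, d + 1):
--                 sub = int(s[i:j])
--                 if sub % d == 0:
--                     divisible_count += 1
--         if divisible_count == 1:
--             count += 1
--     return count
-- ===== SOURCE B (Python) =====
-- def solve_small_brute(N):
--     """Count one-child numbers below N via incremental substring residues (no string slicing/parsing)."""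
--     count = 0
--     for n in range(1, N):
--         # digit list of n, most significant first
--         ds = []
--         m = n
--         while m > 0:
--             ds.append(m % 10)
--             m //= 10
--         ds.reverse()
--         d = len(ds)
--         c = 0
--         ms = []  # residues mod d of the substrings ending at the current position
--         for dig in ds:
--             ms = [(r * 10 + dig) % d for r in ms]
--             ms.append(dig % d)
--             c += ms.count(0)
--         if c == 1:
--             count += 1
--     return count
-- ===== Notes on version B (the rewrite author's own statement) =====
-- stated objective: faster
-- what changed: Replaces per-substring string slicing and int() parsing with arithmetic digit extraction and a single pass per number that maintains the residues mod d of all substrings ending at the current digit (Horner-style incremental mod).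
import Mathlib
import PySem

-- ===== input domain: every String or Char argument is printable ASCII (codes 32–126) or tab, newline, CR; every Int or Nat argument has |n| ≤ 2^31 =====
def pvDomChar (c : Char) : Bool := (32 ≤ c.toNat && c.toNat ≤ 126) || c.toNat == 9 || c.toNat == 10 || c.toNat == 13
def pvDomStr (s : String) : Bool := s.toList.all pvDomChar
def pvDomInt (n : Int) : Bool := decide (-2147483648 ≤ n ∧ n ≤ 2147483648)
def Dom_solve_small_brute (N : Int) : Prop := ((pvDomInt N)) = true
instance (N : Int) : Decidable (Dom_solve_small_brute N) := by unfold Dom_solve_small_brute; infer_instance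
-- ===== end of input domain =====

-- B replaces A's per-substring string slicing and int() parsing by arithmetic digit
-- extraction and one pass per number maintaining the residues mod d of all substrings
-- ending at the current digit (objective: alternative algorithm, fewer digit operations).

-- ===== PORT A =====
-- per-n inner computation of A: s = str(n); d = len(s); count (i,j) with int(s[i:j]) % d == 0
def pvInnerA (n : Int) : Int :=
  let s := PySem.Int.toChars n
  let d : Int := (s.length : Int)
  (PySem.List.pyRange 0 d 1).foldl (fun dc i =>
    (PySem.List.pyRange (i + 1) (d + 1) 1).foldl (fun dc j =>
      -- int(s[i:j]) never raises here (a nonempty slice of decimal digits); `.getD 0` is unreachable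
      let sub := (PySem.Int.ofChars? (PySem.Chars.slice s (some i) (some j))).getD 0
      if PySem.Int.mod sub d == 0 then dc + 1 else dc) dc) 0

def solve_small_brute (N : Int) : Int :=
  (PySem.List.pyRange 1 N 1).foldl (fun count n =>
    if pvInnerA n == 1 then count + 1 else count) 0

-- ===== PORT B =====
-- the `while m > 0: ds.append(m % 10); m //= 10` loop of Source B (list built least-significant first)
def pvDigitsRev (m : Int) : List Int :=
  if _h : 0 < m then PySem.Int.mod m 10 :: pvDigitsRev (PySem.Int.floordiv m 10) else []
  termination_by m.toNat
  decreasing_by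
    have h2 : PySem.Int.floordiv m 10 = m / 10 := PySem.Int.floordiv_eq_ediv_of_pos (by omega)
    rw [h2]; omega

-- one step of Source B's `for dig in ds` loop: state = (ms, c)
def pvStepB (d : Int) (st : List Int × Int) (dig : Int) : List Int × Int :=
  let ms := st.1.map (fun r => PySem.Int.mod (r * 10 + dig) d) ++ [PySem.Int.mod dig d]
  (ms, st.2 + (ms.count 0 : Int))

def pvInnerB (n : Int) : Int :=
  let ds := (pvDigitsRev n).reverse
  let d : Int := (ds.length : Int)
  (ds.foldl (pvStepB d) ([], 0)).2

def solve_small_brute_alt (N : Int) : Int :=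
  (PySem.List.pyRange 1 N 1).foldl (fun count n =>
    if pvInnerB n == 1 then count + 1 else count) 0

-- ===== PRECONDITION & SPEC =====
def Spec_solve_small_brute (N : Int) (out : Int) : Prop := out = solve_small_brute_alt N
instance (N : Int) (out : Int) : Decidable (Spec_solve_small_brute N out) := by unfold Spec_solve_small_brute; infer_instance

-- ===== CLAIM (what is proved, stated in full; the proofs are below) =====
def Claim_equal_solve_small_brute : Prop := ∀ (N : Int), Dom_solve_small_brute N → Spec_solve_small_brute N (solve_small_brute N)

-- ===== LEMMAS AND PROOFS =====

-- the digit-value accumulation step of Python's int() on a digit character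
def pvDigitStep (a : Nat) (c : Char) : Nat := a * 10 + (c.toNat - '0'.toNat)

-- Horner value of a digit list (most significant first)
def pvVal (l : List Nat) : Nat := l.foldl (fun a k => a * 10 + k) 0

theorem pvIsIntSpace_eq_false_of_isDigit (c : Char) (h : c.isDigit = true) :
    PySem.Int.isIntSpace c = false := by
  revert h
  simp [PySem.Int.isIntSpace, Char.isDigit]
  intro h1 h2
  and_intros <;> (rintro rfl; simp_all)

theorem pvMapBind (o : Option Nat) (v : Nat) (h : o = some v) :
    Option.map (fun n : Int => n) (o.bind fun a => pure ((a : Nat) : Int)) = some (v : Int) := by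
  subst h; rfl

-- Python's int() on a nonempty all-digit character list is the Horner value of the digits
theorem pvOfChars_digits (c : Char) (cs : List Char)
    (hd : ∀ x ∈ c :: cs, x.isDigit = true) :
    PySem.Int.ofChars? (c :: cs) = some ↑((c :: cs).foldl pvDigitStep 0) := by
  have hds : ∀ x ∈ c :: cs, PySem.Int.isIntSpace x = false :=
    fun x hx => pvIsIntSpace_eq_false_of_isDigit x (hd x hx)
  have h1 : List.dropWhile PySem.Int.isIntSpace (c :: cs) = c :: cs := by
    rw [List.dropWhile_eq_self_iff]
    intro hl
    simp [hds c List.mem_cons_self]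
  have h2 : List.dropWhile PySem.Int.isIntSpace (c :: cs).reverse = (c :: cs).reverse := by
    rw [List.dropWhile_eq_self_iff]
    intro hl
    rw [Bool.not_eq_true]
    exact hds _ (by rw [← List.mem_reverse]; exact List.getElem_mem hl)
  rw [PySem.Int.ofChars?]
  simp only [h1, h2, List.reverse_reverse]
  split
  · rename_i cs' ds heq
    rw [heq] at hd
    have := hd '-' List.mem_cons_self
    simp [Char.isDigit] at this
  · rename_i cs' ds heq
    rw [heq] at hd
    have := hd '+' List.mem_cons_self
    simp [Char.isDigit] at this
  · apply pvMapBind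
    conv_lhs => whnf
    generalize instDecidableEqBool c.isDigit true = I
    rcases I with h | h
    · exact absurd (hd c List.mem_cons_self) h
    · conv_lhs => whnf
      rw [List.foldl_cons]
      show _ = some (List.foldl pvDigitStep (0 * 10 + (c.toNat - '0'.toNat)) cs)
      have hd' : ∀ x ∈ cs, x.isDigit = true := fun x hx => hd x (List.mem_cons_of_mem _ hx)
      generalize 0 * 10 + (c.toNat - '0'.toNat) = a
      rename_i hm hp
      clear hd hds h1 h2 h hm hp
      induction cs generalizing a with
      | nil => rfl
      | cons c' cs' ih =>
        conv_lhs => whnf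
        generalize instDecidableEqBool c'.isDigit true = I
        rcases I with h' | h'
        · exact absurd (hd' c' List.mem_cons_self) h'
        · conv_lhs => whnf
          rw [List.foldl_cons]
          show _ = some (List.foldl pvDigitStep (a * 10 + (c'.toNat - '0'.toNat)) cs')
          exact ih (fun x hx => hd' x (List.mem_cons_of_mem _ hx)) _

theorem pvToDigitsCore_eq (f : Nat) : ∀ (m : Nat) (l : List Char), 0 < m → m < f →
    Nat.toDigitsCore 10 f m l = ((Nat.digits 10 m).map Nat.digitChar).reverse ++ l := by
  induction f with
  | zero => omega
  | succ f ih =>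
    intro m l hm hf
    rw [Nat.toDigitsCore]
    by_cases h : m / 10 = 0
    · have hd : Nat.digits 10 m = [m % 10] := by
        rw [Nat.digits_def' (by norm_num) hm, h]
        simp
      simp [h, hd]
    · have hrec : Nat.digits 10 m = m % 10 :: Nat.digits 10 (m / 10) :=
        Nat.digits_def' (by norm_num) hm
      rw [if_neg h, ih (m / 10) _ (Nat.pos_of_ne_zero h) (by omega)]
      simp [hrec]

-- str(n) for n > 0 is the decimal digits of n, most significant first
theorem pvToChars_eq (n : Int) (hn : 0 < n) :
    PySem.Int.toChars n = ((Nat.digits 10 n.toNat).map Nat.digitChar).reverse := by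
  rw [PySem.Int.toChars, if_neg (by omega)]
  rw [Nat.toDigits, pvToDigitsCore_eq (n.toNat + 1) n.toNat [] (by omega) (by omega)]
  simp

theorem pvDigitChar_isDigit (k : Nat) (hk : k < 10) : (Nat.digitChar k).isDigit = true := by
  interval_cases k <;> decide

theorem pvDigitChar_toNat (k : Nat) (hk : k < 10) : (Nat.digitChar k).toNat - '0'.toNat = k := by
  interval_cases k <;> decide

theorem pvDigitsRev_eq (m : Nat) : pvDigitsRev (m : Int) = (Nat.digits 10 m).map (fun k : Nat => (k : Int)) := by
  induction m using Nat.strong_induction_on with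
  | _ m ih =>
    rw [pvDigitsRev]
    by_cases hm : 0 < m
    · rw [dif_pos (by exact_mod_cast hm)]
      have hfd : PySem.Int.floordiv (m : Int) 10 = ((m / 10 : Nat) : Int) := PySem.Int.floordiv_natCast m 10
      rw [hfd, ih (m / 10) (Nat.div_lt_self hm (by norm_num))]
      rw [Nat.digits_def' (by norm_num) hm]
      simp
    · rw [dif_neg (by exact_mod_cast hm)]
      have : m = 0 := by omega
      simp [this]

-- residue of the substring of L from i (inclusive) to j (exclusive) modulo the length
def pvResid (L : List Nat) (i j : Nat) : Int :=
  PySem.Int.mod ((pvVal ((L.drop i).take (j - i)) : Nat) : Int) ((L.length : Nat) : Int)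

def pvInd (L : List Nat) (i j : Nat) : Int := if pvResid L i j == 0 then 1 else 0

-- int() applied to A's slice s[i:j] of the digit string yields the Horner value of the digit segment
theorem pvSubVal (L : List Nat) (hdig : ∀ x ∈ L, x < 10) (ik k : Nat)
    (_hik : ik < L.length) (hk : k < L.length - ik) :
    (PySem.Int.ofChars? (PySem.Chars.slice (L.map Nat.digitChar)
        (some (ik : Int)) (some ((ik : Int) + 1 + (k : Int))))).getD 0
      = ((pvVal ((L.drop ik).take (k + 1)) : Nat) : Int) := by
  have hb : ((ik : Int) + 1 + (k : Int)) = ((ik + 1 + k : Nat) : Int) := by push_cast; ring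
  rw [PySem.Chars.slice_eq_listSlice, hb, PySem.List.slice_natCast,
      show ik + 1 + k - ik = k + 1 by omega]
  rw [← List.map_drop, ← List.map_take]
  set seg := (L.drop ik).take (k + 1) with hseg
  have hmem : ∀ x ∈ seg, x < 10 := by
    intro x hx
    exact hdig x (List.mem_of_mem_drop (List.mem_of_mem_take hx))
  have hne : seg ≠ [] := by
    have : seg.length = min (k + 1) (L.length - ik) := by
      simp [hseg, List.length_take, List.length_drop]
    intro hnil
    rw [hnil] at this
    simp at this
    omega
  obtain ⟨c, rest, hcr⟩ := List.exists_cons_of_ne_nil hne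
  rw [hcr, List.map_cons]
  rw [pvOfChars_digits (Nat.digitChar c) (rest.map Nat.digitChar) ?hd]
  case hd =>
    intro x hx
    rw [← List.map_cons] at hx
    obtain ⟨y, hy, rfl⟩ := List.mem_map.mp hx
    exact pvDigitChar_isDigit y (hmem y (hcr ▸ hy))
  rw [Option.getD_some]
  congr 1
  rw [← List.map_cons, List.foldl_map]
  rw [pvVal, ← hcr]
  apply PySem.List.foldl_congr_mem
  intro a x hx
  show a * 10 + ((Nat.digitChar x).toNat - '0'.toNat) = a * 10 + x
  rw [pvDigitChar_toNat x (hmem x hx)]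

-- A's inner double loop as an indicator double sum
theorem pvInnerA_eq (n : Int) (hn : 1 ≤ n) :
    pvInnerA n =
      ((List.range ((Nat.digits 10 n.toNat).reverse.length)).map (fun i =>
        ((List.range ((Nat.digits 10 n.toNat).reverse.length - i)).map (fun k =>
          pvInd (Nat.digits 10 n.toNat).reverse i (i + 1 + k))).sum)).sum := by
  lift n to Nat using (by omega : (0:Int) ≤ n) with m
  have hm : (0 : Int) < (m : Int) := by exact_mod_cast hn
  rw [pvInnerA]
  rw [pvToChars_eq _ hm]
  simp only [Int.toNat_natCast, ← List.map_reverse]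
  set L := (Nat.digits 10 m).reverse with hL
  have hdig : ∀ x ∈ L, x < 10 := by
    intro x hx
    exact Nat.digits_lt_base (by norm_num) (List.mem_reverse.mp (hL ▸ hx))
  rw [List.length_map, PySem.List.pyRange_zero_natCast, List.foldl_map]
  rw [PySem.List.foldl_congr_mem _ _ (fun dc ik => dc +
      ((List.range (L.length - ik)).map (fun k => pvInd L ik (ik + 1 + k))).sum) 0 ?hbody]
  case hbody =>
    intro dc ik hikmem
    rw [List.mem_range] at hikmem
    rw [PySem.List.pyRange_one, show (((L.length : Int) + 1) - ((ik : Int) + 1)).toNat = L.length - ik by omega,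
        List.foldl_map]
    rw [PySem.List.foldl_congr_mem _ _ (fun dc k =>
        if pvResid L ik (ik + 1 + k) == 0 then dc + 1 else dc) dc ?hinner]
    case hinner =>
      intro dc' k hkmem
      rw [List.mem_range] at hkmem
      rw [pvSubVal L hdig ik k hikmem hkmem]
      simp only [pvResid, show ik + 1 + k - ik = k + 1 by omega]
    rw [PySem.List.foldl_if_add_one (fun k => pvResid L ik (ik + 1 + k) == 0)]
    rw [← PySem.List.sum_map_ite_one_zero (fun k => pvResid L ik (ik + 1 + k) == 0)]
    rfl
  rw [PySem.List.foldl_add _ _ 0, zero_add]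

theorem pvModStep (v g d : Int) (hd : 0 < d) :
    PySem.Int.mod (PySem.Int.mod v d * 10 + g) d = PySem.Int.mod (v * 10 + g) d := by
  rw [PySem.Int.mod_eq_emod_of_pos hd, PySem.Int.mod_eq_emod_of_pos hd,
      PySem.Int.mod_eq_emod_of_pos hd]
  conv_rhs => rw [show v * 10 + g = v % d * 10 + g + d * (v / d * 10) by rw [Int.emod_def]; ring]
  rw [Int.add_mul_emod_self_left]

theorem pvSeg_step (L : List Nat) (i k : Nat) (hik : i ≤ k) (hk : k < L.length) :
    (L.drop i).take (k + 1 - i) = (L.drop i).take (k - i) ++ [L[k]] := by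
  have h1 : k + 1 - i = (k - i) + 1 := by omega
  rw [h1, List.take_add_one]
  have h2 : (L.drop i)[k - i]? = some L[k] := by
    rw [List.getElem?_drop, show i + (k - i) = k by omega, List.getElem?_eq_getElem hk]
  rw [h2]
  rfl

theorem pvVal_append (xs : List Nat) (y : Nat) : pvVal (xs ++ [y]) = pvVal xs * 10 + y := by
  simp [pvVal, List.foldl_append]

theorem pvResid_step (L : List Nat) (i k : Nat) (hik : i ≤ k) (hk : k < L.length) :
    PySem.Int.mod (pvResid L i k * 10 + ((L[k] : Nat) : Int)) ((L.length : Nat) : Int)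
      = pvResid L i (k + 1) := by
  have hd : (0 : Int) < ((L.length : Nat) : Int) := by exact_mod_cast Nat.pos_of_ne_zero (by omega)
  rw [pvResid, pvModStep _ _ _ hd, pvResid, pvSeg_step L i k hik hk, pvVal_append]
  push_cast
  ring_nf

theorem pvResid_last (L : List Nat) (k : Nat) (hk : k < L.length) :
    PySem.Int.mod ((L[k] : Nat) : Int) ((L.length : Nat) : Int) = pvResid L k (k + 1) := by
  have hseg : (L.drop k).take (k + 1 - k) = [L[k]] := by
    have := pvSeg_step L k k (le_refl k) hk
    simpa using this
  rw [pvResid, hseg]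
  simp [pvVal]

theorem pvFoldB (L : List Nat) : ∀ (k : Nat), k ≤ L.length →
    ((L.take k).map (fun x => ((x : Nat) : Int))).foldl (pvStepB ((L.length : Nat) : Int)) ([], 0)
      = ((List.range k).map (fun i => pvResid L i k),
         ((List.range k).map (fun j =>
           ((List.count 0 ((List.range (j + 1)).map (fun i => pvResid L i (j + 1)))) : Int))).sum) := by
  intro k
  induction k with
  | zero => simp
  | succ k ih =>
    intro hk1
    have hk : k < L.length := by omega
    rw [List.take_add_one, List.getElem?_eq_getElem hk]
    simp only [Option.toList_some, List.map_append, List.foldl_append, List.map_cons,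
      List.map_nil, List.foldl_cons, List.foldl_nil]
    rw [ih (by omega)]
    have hms : ((List.range k).map (fun i => pvResid L i k)).map
          (fun r => PySem.Int.mod (r * 10 + ((L[k] : Nat) : Int)) ((L.length : Nat) : Int))
          ++ [PySem.Int.mod ((L[k] : Nat) : Int) ((L.length : Nat) : Int)]
        = (List.range (k + 1)).map (fun i => pvResid L i (k + 1)) := by
      rw [List.map_map, List.range_succ, List.map_append]
      congr 1
      · apply List.map_congr_left
        intro i hi
        rw [List.mem_range] at hi
        exact pvResid_step L i k (by omega) hk
      · simp [pvResid_last L k hk]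
    rw [pvStepB, hms]
    congr 1
    simp [List.range_succ, List.count_append]

theorem pvCount_toSum (L : List Nat) (m j : Nat) :
    ((List.count 0 ((List.range m).map (fun i => pvResid L i j))) : Int)
      = ((List.range m).map (fun i => pvInd L i j)).sum := by
  rw [List.count_eq_countP, List.countP_map, ← PySem.List.sum_map_ite_one_zero]
  simp [pvInd, Function.comp]

-- B's inner loop as an indicator double sum (column-major)
theorem pvInnerB_eq (n : Int) (hn : 1 ≤ n) :
    pvInnerB n =
      ((List.range ((Nat.digits 10 n.toNat).reverse.length)).map (fun j =>
        ((List.range (j + 1)).map (fun i =>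
          pvInd (Nat.digits 10 n.toNat).reverse i (j + 1))).sum)).sum := by
  lift n to Nat using (by omega : (0:Int) ≤ n) with m
  simp only [Int.toNat_natCast]
  rw [pvInnerB]
  rw [pvDigitsRev_eq]
  rw [← List.map_reverse]
  set L := (Nat.digits 10 m).reverse with hL
  rw [List.length_map]
  rw [show L.map (fun k : Nat => (k : Int)) = (L.take L.length).map (fun k : Nat => (k : Int)) by rw [List.take_length]]
  rw [pvFoldB L L.length (le_refl _)]
  dsimp only
  exact congrArg List.sum (List.map_congr_left (fun j hj => pvCount_toSum L (j + 1) (j + 1)))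

-- triangle sum swap, list level
theorem pvSwap (e : Nat → Nat → Int) (d : Nat) :
    ((List.range d).map (fun i => ((List.range (d - i)).map (fun k => e i (i + 1 + k))).sum)).sum
      = ((List.range d).map (fun j => ((List.range (j + 1)).map (fun i => e i (j + 1))).sum)).sum := by
  induction d with
  | zero => simp
  | succ d ih =>
    have hsplit : ∀ i ∈ List.range d,
        ((List.range (d + 1 - i)).map (fun k => e i (i + 1 + k))).sum
          = ((List.range (d - i)).map (fun k => e i (i + 1 + k))).sum + e i (d + 1) := by
      intro i hi
      rw [List.mem_range] at hi
      have h1 : d + 1 - i = (d - i) + 1 := by omega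
      rw [h1, List.range_succ, List.map_append, List.sum_append]
      simp [show i + 1 + (d - i) = d + 1 by omega]
    rw [List.range_succ, List.map_append, List.sum_append, List.map_append, List.sum_append,
        List.map_congr_left hsplit, List.sum_map_add, ih]
    simp [List.range_succ]
    ring

theorem pvInner_eq (n : Int) (hn : 1 ≤ n) : pvInnerA n = pvInnerB n := by
  rw [pvInnerA_eq n hn, pvInnerB_eq n hn, pvSwap]

-- ===== VERDICT (by name: the statement is the Claim_ definition above) =====
theorem solve_small_brute_spec : Claim_equal_solve_small_brute := by
  intro N _
  unfold Spec_solve_small_brute solve_small_brute solve_small_brute_alt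
  apply PySem.List.foldl_congr_mem
  intro acc n hn
  rw [PySem.List.mem_pyRange_one] at hn
  rw [pvInner_eq n hn.1]
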